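-- pv_equiv track=rewrite | github.com/LaurelwoodsWorks/FlexiEB-statement-merge | (outdated)/exhaustive_search.py | is_duplicated
-- ===== SOURCE A (Python) =====
-- def is_duplicated(target_list: list, target_row: dict) -> bool:
--     '''
--     {target_list} : list of statement info for check duplicate
--     {target_row} : target row for check
--     '''
--     statements = list(target_row.keys())
--
--     for l_row in target_list:
--         l_statements = list(l_row.keys())
--
--         if len(l_statements) != len(statements):
--             continue
--
--         matched = True
--         for l, s in zip(sorted(l_statements), sorted(statements)):  # Are statements info already sorted for sure?
--             if l != s:
--                 matched = False
--                 break
--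
--         if matched: return True
--
--     return False
-- ===== SOURCE B (Python) =====
-- def is_duplicated(target_list: list, target_row: dict) -> bool:
--     # Inverted index: key -> set of indices of rows of target_list containing that key.
--     inverted = {}
--     for i, l_row in enumerate(target_list):
--         for k in l_row:
--             inverted.setdefault(k, set()).add(i)
--     n = len(target_row)
--     # Candidate rows: exactly as many keys as target_row.
--     candidates = {i for i, l_row in enumerate(target_list) if len(l_row) == n}
--     # A candidate survives iff it contains every key of target_row; with equal
--     # sizes that forces key-set equality.
--     for k in target_row:
--         candidates &= inverted.get(k, set())
--     return bool(candidates)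
-- ===== Notes on version B (the rewrite author's own statement) =====
-- stated objective: alternative
-- what changed: B builds an inverted index (key -> set of row indices) plus a length-filtered candidate set and answers by intersecting the index sets over target_row's keys, instead of A's per-row scan that sorts and zips each row's key list against the query's.
import Mathlib
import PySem

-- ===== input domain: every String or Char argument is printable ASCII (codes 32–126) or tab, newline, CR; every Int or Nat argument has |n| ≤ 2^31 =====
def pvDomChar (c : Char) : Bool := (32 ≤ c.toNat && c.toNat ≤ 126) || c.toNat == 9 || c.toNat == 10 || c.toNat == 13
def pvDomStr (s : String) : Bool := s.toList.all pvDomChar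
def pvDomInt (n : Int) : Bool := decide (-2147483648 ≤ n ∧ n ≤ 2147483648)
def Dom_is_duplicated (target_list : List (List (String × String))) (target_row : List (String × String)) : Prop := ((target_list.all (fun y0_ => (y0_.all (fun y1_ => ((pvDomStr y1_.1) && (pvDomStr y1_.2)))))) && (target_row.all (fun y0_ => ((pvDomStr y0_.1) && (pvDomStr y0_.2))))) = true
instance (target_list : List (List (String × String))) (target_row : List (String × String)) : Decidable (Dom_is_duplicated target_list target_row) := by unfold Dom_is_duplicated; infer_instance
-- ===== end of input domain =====

-- B replaces A's per-row scan (sort each row's keys and zip against the sorted query) by an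
-- inverted index key -> row-index set, a length-filtered candidate set, and set intersections (alternative algorithm).


-- ===== PORT A =====
-- list(d.keys()) for a dict encoded as an association list: keys in first-occurrence order
def pvKeys (row : List (String × String)) : List String :=
  PySem.List.dedup (row.map Prod.fst)

-- the inner 'for l, s in zip(...): if l != s: matched = False; break' loop
def pvZipLoop : List (String × String) → Bool
  | [] => true
  | (l, s) :: rest => if l ≠ s then false else pvZipLoop rest

-- the outer 'for l_row in target_list' loop
def pvALoop (statements : List String) : List (List (String × String)) → Bool
  | [] => false
  | l_row :: rest =>
    let l_statements := pvKeys l_row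
    if l_statements.length ≠ statements.length then pvALoop statements rest
    else
      let matched := pvZipLoop ((PySem.List.sorted l_statements (fun x => x) false).zip
                                (PySem.List.sorted statements (fun x => x) false))
      if matched then true else pvALoop statements rest

def is_duplicated (target_list : List (List (String × String))) (target_row : List (String × String)) : Bool :=
  pvALoop (pvKeys target_row) target_list

-- ===== PORT B =====
-- 'inverted.setdefault(k, set()).add(i)' is exactly d[k] = d.get(k, set()).add(i) in place,
-- i.e. Dict.modify k [] (Set.add · i)
def is_duplicated_alt (target_list : List (List (String × String))) (target_row : List (String × String)) : Bool :=
  let inverted : PySem.Dict String (PySem.Set Int) :=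
    (PySem.List.enumerate target_list 0).foldl
      (fun d p => (pvKeys p.2).foldl
        (fun d k => PySem.Dict.modify d k [] (fun s => PySem.Set.add s p.1)) d)
      PySem.Dict.empty
  let n := (pvKeys target_row).length
  let candidates : PySem.Set Int :=
    PySem.Set.ofList
      (((PySem.List.enumerate target_list 0).filter
          (fun p => (pvKeys p.2).length == n)).map (·.1))
  let final : PySem.Set Int :=
    (pvKeys target_row).foldl
      (fun c k => PySem.Set.inter c (PySem.Dict.getD inverted k [])) candidates
  !final.isEmpty

-- ===== PRECONDITION & SPEC =====
def Spec_is_duplicated (target_list : List (List (String × String))) (target_row : List (String × String)) (out : Bool) : Prop := out = is_duplicated_alt target_list target_row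
instance (target_list : List (List (String × String))) (target_row : List (String × String)) (out : Bool) : Decidable (Spec_is_duplicated target_list target_row out) := by unfold Spec_is_duplicated; infer_instance

-- ===== CLAIM (what is proved, stated in full; the proofs are below) =====
def Claim_equal_is_duplicated : Prop := ∀ (target_list : List (List (String × String))) (target_row : List (String × String)), Dom_is_duplicated target_list target_row → Spec_is_duplicated target_list target_row (is_duplicated target_list target_row)

-- ===== LEMMAS AND PROOFS =====

-- A-side: the handwritten zip-compare loop is list equality (at equal lengths)
theorem pvZipLoop_eq (xs : List String) : ∀ ys : List String, xs.length = ys.length →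
    pvZipLoop (xs.zip ys) = decide (xs = ys) := by
  induction xs with
  | nil => intro ys h; cases ys <;> simp_all [pvZipLoop]
  | cons x xs ih =>
    intro ys h
    cases ys with
    | nil => simp at h
    | cons y ys =>
      simp only [List.zip_cons_cons, pvZipLoop]
      by_cases hxy : x = y
      · subst hxy
        simp [ih ys (by simpa using h)]
      · simp [hxy]

-- A-side: the outer loop returns whether some row has the same sorted key list
theorem pvALoop_eq (stmts : List String) (l : List (List (String × String))) :
    pvALoop stmts l = true ↔
      ∃ r ∈ l, PySem.List.sorted (pvKeys r) (fun x => x) false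
             = PySem.List.sorted stmts (fun x => x) false := by
  induction l with
  | nil => simp [pvALoop]
  | cons r rest ih =>
    simp only [pvALoop]
    by_cases hl : (pvKeys r).length = stmts.length
    · have hz : (PySem.List.sorted (pvKeys r) (fun x => x) false).length
          = (PySem.List.sorted stmts (fun x => x) false).length := by
        simp [PySem.List.length_sorted, hl]
      rw [if_neg (by simpa using hl), pvZipLoop_eq _ _ hz]
      by_cases he : PySem.List.sorted (pvKeys r) (fun x => x) false
          = PySem.List.sorted stmts (fun x => x) false
      · rw [decide_eq_true he]
        simp only [if_true, true_iff]
        exact ⟨r, List.mem_cons_self, he⟩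
      · rw [decide_eq_false he]
        simp only [Bool.false_eq_true, if_false, ih]
        constructor
        · rintro ⟨r', hr', h⟩; exact ⟨r', List.mem_cons_of_mem _ hr', h⟩
        · rintro ⟨r', hr', h⟩
          rcases List.mem_cons.mp hr' with rfl | hr'
          · exact absurd h he
          · exact ⟨r', hr', h⟩
    · rw [if_pos (by simpa using hl)]
      rw [ih]
      constructor
      · rintro ⟨r', hr', h⟩; exact ⟨r', List.mem_cons_of_mem _ hr', h⟩
      · rintro ⟨r', hr', h⟩
        rcases List.mem_cons.mp hr' with rfl | hr'
        · exact absurd (by simpa [PySem.List.length_sorted] using congrArg List.length h) hl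
        · exact ⟨r', hr', h⟩

-- B-side: membership in the inner per-row index-building loop
theorem mem_getD_keyfold (i : Int) (keys : List String)
    (d : PySem.Dict String (PySem.Set Int)) (k : String) (j : Int) :
    (j ∈ (keys.foldl (fun d k => PySem.Dict.modify d k [] (fun s => PySem.Set.add s i)) d).getD k [])
      ↔ j ∈ d.getD k [] ∨ (j = i ∧ k ∈ keys) := by
  induction keys generalizing d with
  | nil => simp
  | cons a keys ih =>
    simp only [List.foldl_cons, ih, PySem.Dict.getD_modify, List.mem_cons]
    by_cases hk : k = a
    · subst hk
      simp [PySem.Set.mem_add]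
      tauto
    · simp [hk]

-- B-side: membership in the full inverted index
theorem mem_getD_rowfold (rows : List (Int × List (String × String)))
    (d : PySem.Dict String (PySem.Set Int)) (k : String) (j : Int) :
    (j ∈ (rows.foldl (fun d p => (pvKeys p.2).foldl
        (fun d k => PySem.Dict.modify d k [] (fun s => PySem.Set.add s p.1)) d) d).getD k [])
      ↔ j ∈ d.getD k [] ∨ ∃ p ∈ rows, j = p.1 ∧ k ∈ pvKeys p.2 := by
  induction rows generalizing d with
  | nil => simp
  | cons p rows ih =>
    simp only [List.foldl_cons, ih, mem_getD_keyfold, List.mem_cons]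
    constructor
    · rintro (((h | h) | ⟨q, hq, h⟩))
      · exact Or.inl h
      · exact Or.inr ⟨p, Or.inl rfl, h⟩
      · exact Or.inr ⟨q, Or.inr hq, h⟩
    · rintro (h | ⟨q, (rfl | hq), h⟩)
      · exact Or.inl (Or.inl h)
      · exact Or.inl (Or.inr h)
      · exact Or.inr ⟨q, hq, h⟩

-- B-side: membership after the intersection loop
theorem mem_interfold (ks : List String) (inv : PySem.Dict String (PySem.Set Int))
    (c : PySem.Set Int) (j : Int) :
    (j ∈ ks.foldl (fun c k => PySem.Set.inter c (PySem.Dict.getD inv k [])) c)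
      ↔ j ∈ c ∧ ∀ k ∈ ks, j ∈ inv.getD k [] := by
  induction ks generalizing c with
  | nil => simp
  | cons a ks ih =>
    simp only [List.foldl_cons, ih, PySem.Set.mem_inter, List.mem_cons]
    constructor
    · rintro ⟨⟨hc, ha⟩, h⟩
      exact ⟨hc, fun k hk => by rcases hk with rfl | hk; exact ha; exact h k hk⟩
    · rintro ⟨hc, h⟩
      exact ⟨⟨hc, h a (Or.inl rfl)⟩, fun k hk => h k (Or.inr hk)⟩

-- equal sorted key lists = equal length plus containment (for nodup key lists)
theorem sorted_eq_iff_len_subset (K Q : List String) (hQ : Q.Nodup) :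
    PySem.List.sorted K (fun x => x) false = PySem.List.sorted Q (fun x => x) false
      ↔ K.length = Q.length ∧ ∀ k ∈ Q, k ∈ K := by
  rw [PySem.List.sorted_id_eq_sorted_id_iff_perm]
  constructor
  · intro h
    exact ⟨h.length_eq, fun k hk => h.mem_iff.mpr hk⟩
  · rintro ⟨hlen, hsub⟩
    have hsp : Q.Subperm K := List.subperm_of_subset hQ (fun k hk => hsub k hk)
    exact (hsp.perm_of_length_le (le_of_eq hlen)).symm

theorem nodup_pvKeys (row : List (String × String)) : (pvKeys row).Nodup :=
  PySem.List.nodup_dedup _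

-- B returns whether some row has the same sorted key list as target_row
theorem alt_iff (tl : List (List (String × String))) (tr : List (String × String)) :
    is_duplicated_alt tl tr = true ↔
      ∃ r ∈ tl, PySem.List.sorted (pvKeys r) (fun x => x) false
             = PySem.List.sorted (pvKeys tr) (fun x => x) false := by
  simp only [is_duplicated_alt]
  rw [Bool.not_eq_true', List.isEmpty_eq_false_iff_exists_mem]
  constructor
  · rintro ⟨j, hj⟩
    rw [mem_interfold] at hj
    obtain ⟨hc, hall⟩ := hj
    rw [PySem.Set.mem_ofList, List.mem_map] at hc
    obtain ⟨p, hp, hp1⟩ := hc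
    rw [List.mem_filter] at hp
    obtain ⟨hpmem, hplen⟩ := hp
    rw [PySem.List.mem_enumerate_iff] at hpmem
    obtain ⟨m, hm, rfl⟩ := hpmem
    refine ⟨tl[m], List.getElem_mem hm, ?_⟩
    rw [sorted_eq_iff_len_subset _ _ (nodup_pvKeys _)]
    refine ⟨by simpa using hplen, fun k hk => ?_⟩
    have := hall k hk
    rw [mem_getD_rowfold] at this
    rcases this with h | ⟨q, hq, hjq, hkq⟩
    · simp at h
    · rw [PySem.List.mem_enumerate_iff] at hq
      obtain ⟨m', hm', rfl⟩ := hq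
      have : (m : Int) = m' := by simp at hp1 hjq; omega
      have hmm : m = m' := by exact_mod_cast this
      subst hmm
      exact hkq
  · rintro ⟨r, hr, hsort⟩
    obtain ⟨m, hm, rfl⟩ := List.mem_iff_getElem.mp hr
    rw [sorted_eq_iff_len_subset _ _ (nodup_pvKeys _)] at hsort
    obtain ⟨hlen, hsub⟩ := hsort
    refine ⟨(m : Int), ?_⟩
    rw [mem_interfold]
    constructor
    · rw [PySem.Set.mem_ofList, List.mem_map]
      refine ⟨((m : Int), tl[m]), ?_, rfl⟩
      rw [List.mem_filter]
      refine ⟨?_, by simpa using hlen⟩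
      rw [PySem.List.mem_enumerate_iff]
      exact ⟨m, hm, by simp⟩
    · intro k hk
      rw [mem_getD_rowfold]
      refine Or.inr ⟨((m : Int), tl[m]), ?_, rfl, hsub k hk⟩
      rw [PySem.List.mem_enumerate_iff]
      exact ⟨m, hm, by simp⟩

-- ===== VERDICT (by name: the statement is the Claim_ definition above) =====
theorem is_duplicated_spec : Claim_equal_is_duplicated := by
  intro tl tr _
  unfold Spec_is_duplicated is_duplicated
  rw [Bool.eq_iff_iff, pvALoop_eq, alt_iff]
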